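-- pv_equiv track=rewrite | github.com/xihaopark/Agent-complexity | main/finish/workflow_candidates/gersteinlab__ASTRO/python/ASTRO/demultiplexer2.py | process_chunk
-- ===== SOURCE A (Python) =====
-- def process_chunk(chunk_lines):
--     read_count = set()
--     read_delete = set()
--     line = chunk_lines[0]
--     read_name0 = line
--     for line in chunk_lines[1:]:
--         read_name = line
--         if read_name == read_name0:
--             read_delete.add(read_name)
--         else:
--             read_count.add(read_name0)
--             read_name0 = read_name
--     if read_name0 not in read_delete:
--         read_count.add(read_name0)
--     return read_count, read_delete
-- ===== SOURCE B (Python) =====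
-- def _runs(xs):
--     """Consecutive-run encoding: list of (value, length) pairs."""
--     runs = []
--     cur = None
--     cnt = 0
--     for x in xs:
--         if cnt > 0 and x == cur:
--             cnt += 1
--         else:
--             if cnt > 0:
--                 runs.append((cur, cnt))
--             cur = x
--             cnt = 1
--     if cnt > 0:
--         runs.append((cur, cnt))
--     return runs
--
--
-- def process_chunk(chunk_lines):
--     runs = _runs(chunk_lines)
--     read_delete = {k for k, n in runs if n > 1}
--     read_count = {k for k, _ in runs[:-1]}
--     last = runs[-1][0]  # IndexError on empty input, like the original
--     if last not in read_delete:
--         read_count.add(last)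
--     return read_count, read_delete
-- ===== Notes on version B (the rewrite author's own statement) =====
-- stated objective: alternative
-- what changed: B first materializes the run-length encoding of consecutive duplicates, then builds read_delete as the values of runs longer than 1 and read_count as the values of all runs but the last plus the last run's value when it is not deleted, instead of A's single pass that mutates both sets while tracking the previous line.
import Mathlib
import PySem

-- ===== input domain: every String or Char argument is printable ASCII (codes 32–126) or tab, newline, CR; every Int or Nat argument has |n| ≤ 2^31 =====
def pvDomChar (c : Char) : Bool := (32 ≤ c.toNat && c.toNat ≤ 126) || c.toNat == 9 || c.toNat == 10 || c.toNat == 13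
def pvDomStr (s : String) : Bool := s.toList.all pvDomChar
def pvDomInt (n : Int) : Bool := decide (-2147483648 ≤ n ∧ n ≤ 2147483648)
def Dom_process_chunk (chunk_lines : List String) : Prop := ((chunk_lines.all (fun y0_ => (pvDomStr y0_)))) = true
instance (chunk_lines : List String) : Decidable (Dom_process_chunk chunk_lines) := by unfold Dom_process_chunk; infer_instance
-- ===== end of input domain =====

-- B re-implements A by materializing the run-length encoding of consecutive duplicates first
-- and then building both sets from the runs (alternative decomposition, same O(n) cost).

-- ===== PORT A =====
-- loop body of A's 'for line in chunk_lines[1:]' (state = (read_count, read_delete, read_name0))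
def aStep (st : PySem.Set String × PySem.Set String × String) (line : String) :
    PySem.Set String × PySem.Set String × String :=
  if line = st.2.2 then (st.1, PySem.Set.add st.2.1 line, st.2.2)
  else (PySem.Set.add st.1 st.2.2, st.2.1, line)

-- A's final 'if read_name0 not in read_delete: read_count.add(read_name0)' and return
def aFin (st : PySem.Set String × PySem.Set String × String) : List String × List String :=
  if PySem.Set.contains st.2.1 st.2.2 = false then (PySem.Set.add st.1 st.2.2, st.2.1)
  else (st.1, st.2.1)

def process_chunk (chunk_lines : List String) : List String × List String :=
  match PySem.List.pyGet? chunk_lines 0 with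
  | none => ([], [])  -- chunk_lines[0] raises IndexError in Python: excluded by Pre_
  | some line =>
      aFin ((PySem.List.slice chunk_lines (some 1) none).foldl aStep
        (PySem.Set.empty, PySem.Set.empty, line))

-- ===== PORT B =====
-- loop body of _runs (state = (runs, cur, cnt); initial cur=None is never read because cnt=0)
def bStep (st : List (String × Int) × String × Int) (x : String) :
    List (String × Int) × String × Int :=
  if 0 < st.2.2 ∧ x = st.2.1 then (st.1, st.2.1, st.2.2 + 1)
  else ((if 0 < st.2.2 then st.1 ++ [(st.2.1, st.2.2)] else st.1), x, 1)

-- _runs' trailing 'if cnt > 0: runs.append((cur, cnt))'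
def pcFinish (st : List (String × Int) × String × Int) : List (String × Int) :=
  if 0 < st.2.2 then st.1 ++ [(st.2.1, st.2.2)] else st.1

def pcRuns (xs : List String) : List (String × Int) :=
  pcFinish (xs.foldl bStep ([], "", 0))

-- body of process_chunk after 'runs = _runs(chunk_lines)'
def bOfRuns (runs : List (String × Int)) : List String × List String :=
  let read_delete : PySem.Set String :=
    PySem.Set.ofList ((runs.filter (fun r => decide (1 < r.2))).map Prod.fst)
  let read_count : PySem.Set String :=
    PySem.Set.ofList ((PySem.List.slice runs none (some (-1))).map Prod.fst)
  match PySem.List.pyGet? runs (-1) with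
  | none => ([], [])  -- runs[-1] raises IndexError in Python (empty input): excluded by Pre_
  | some lastRun =>
      if PySem.Set.contains read_delete lastRun.1 = false then
        (PySem.Set.add read_count lastRun.1, read_delete)
      else (read_count, read_delete)

def process_chunk_alt (chunk_lines : List String) : List String × List String :=
  bOfRuns (pcRuns chunk_lines)

-- ===== PRECONDITION & SPEC =====
-- A evaluates chunk_lines[0], which raises IndexError on the empty list; Pre_ excludes exactly that input.
def Pre_process_chunk (chunk_lines : List String) : Prop := chunk_lines ≠ []
instance (chunk_lines : List String) : Decidable (Pre_process_chunk chunk_lines) := by unfold Pre_process_chunk; infer_instance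
def pvWitness_process_chunk : List String := ["r1", "r2", "r2", "r3"]

def Spec_process_chunk (chunk_lines : List String) (out : List String × List String) : Prop := out = process_chunk_alt chunk_lines
instance (chunk_lines : List String) (out : List String × List String) : Decidable (Spec_process_chunk chunk_lines out) := by unfold Spec_process_chunk; infer_instance

-- ===== CLAIM (what is proved, stated in full; the proofs are below) =====
def Claim_equal_process_chunk : Prop := ∀ (chunk_lines : List String), Dom_process_chunk chunk_lines → Pre_process_chunk chunk_lines → Spec_process_chunk chunk_lines (process_chunk chunk_lines)

-- ===== LEMMAS AND PROOFS =====

-- A's read_count, as a function of the completed runs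
def rcOf (runs : List (String × Int)) : PySem.Set String :=
  PySem.Set.ofList (runs.map Prod.fst)

-- A's read_delete, as a function of the completed runs and the current run (cur, cnt)
def rdOf (runs : List (String × Int)) (cur : String) (cnt : Int) : PySem.Set String :=
  PySem.Set.ofList ((runs.filter (fun r => decide (1 < r.2))).map Prod.fst ++
    (if 1 < cnt then [cur] else []))

lemma rcOf_snoc (runs : List (String × Int)) (cur : String) (cnt : Int) :
    PySem.Set.add (rcOf runs) cur = rcOf (runs ++ [(cur, cnt)]) := by
  simp [rcOf, PySem.Set.ofList_append_singleton]

lemma rdOf_snoc (runs : List (String × Int)) (cur x : String) (cnt : Int) :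
    rdOf runs cur cnt = rdOf (runs ++ [(cur, cnt)]) x 1 := by
  by_cases h : 1 < cnt <;> simp [rdOf, List.filter_append, h]

lemma rdOf_add (runs : List (String × Int)) (cur : String) (cnt : Int) (h : 0 < cnt) :
    PySem.Set.add (rdOf runs cur cnt) cur = rdOf runs cur (cnt + 1) := by
  by_cases h1 : 1 < cnt
  · have hm : cur ∈ rdOf runs cur cnt := by
      simp [rdOf, PySem.Set.mem_ofList, h1]
    rw [PySem.Set.add_of_mem hm]
    have : (1:Int) < cnt + 1 := by omega
    simp [rdOf, h1, this]
  · have hc : cnt = 1 := by omega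
    subst hc
    simp [rdOf, PySem.Set.ofList_append_singleton]

lemma bOfRuns_snoc (runs : List (String × Int)) (cur : String) (cnt : Int) :
    bOfRuns (runs ++ [(cur, cnt)]) =
      aFin (rcOf runs, rdOf runs cur cnt, cur) := by
  unfold bOfRuns aFin
  rw [PySem.List.pyGet?_neg_one_append_singleton]
  have hone : List.filter (fun r => decide (1 < r.2)) [(cur, cnt)]
      = if 1 < cnt then [(cur, cnt)] else [] := by
    by_cases h1 : 1 < cnt <;> simp [h1]
  simp only [PySem.List.slice_to_neg_one, List.dropLast_concat, List.filter_append, hone,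
    List.map_append, apply_ite (List.map Prod.fst), List.map_cons, List.map_nil]
  rfl

-- loop invariant: A's fold from state (rcOf runs, rdOf runs cur cnt, cur) followed by A's
-- final step equals B's pipeline applied to the runs B's fold produces from (runs, cur, cnt)
lemma pc_loop (rest : List String) : ∀ (runs : List (String × Int)) (cur : String) (cnt : Int),
    0 < cnt →
    aFin (rest.foldl aStep (rcOf runs, rdOf runs cur cnt, cur))
      = bOfRuns (pcFinish (rest.foldl bStep (runs, cur, cnt))) := by
  induction rest with
  | nil =>
      intro runs cur cnt h
      simp only [List.foldl_nil, pcFinish, if_pos h]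
      exact (bOfRuns_snoc runs cur cnt).symm
  | cons x rest ih =>
      intro runs cur cnt h
      simp only [List.foldl_cons]
      by_cases hx : x = cur
      · subst hx
        have hb : bStep (runs, x, cnt) x = (runs, x, cnt + 1) := by
          simp [bStep, h]
        have ha : aStep (rcOf runs, rdOf runs x cnt, x) x
            = (rcOf runs, rdOf runs x (cnt + 1), x) := by
          simp [aStep, rdOf_add runs x cnt h]
        rw [ha, hb]
        exact ih runs x (cnt + 1) (by omega)
      · have hb : bStep (runs, cur, cnt) x = (runs ++ [(cur, cnt)], x, 1) := by
          simp [bStep, hx, h]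
        have ha : aStep (rcOf runs, rdOf runs cur cnt, cur) x
            = (rcOf (runs ++ [(cur, cnt)]), rdOf (runs ++ [(cur, cnt)]) x 1, x) := by
          simp [aStep, hx, rcOf_snoc runs cur cnt, ← rdOf_snoc]
        rw [ha, hb]
        exact ih (runs ++ [(cur, cnt)]) x 1 (by omega)

-- ===== VERDICT (by name: the statement is the Claim_ definition above) =====
theorem process_chunk_spec : Claim_equal_process_chunk := by
  intro chunk_lines _ hpre
  unfold Spec_process_chunk
  cases chunk_lines with
  | nil => exact absurd rfl hpre
  | cons line t =>
      have hA : process_chunk (line :: t)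
          = aFin (t.foldl aStep (rcOf [], rdOf [] line 1, line)) := by
        simp [process_chunk, PySem.List.slice_from_one,
          rcOf, rdOf, PySem.Set.empty]
      have hB : process_chunk_alt (line :: t)
          = bOfRuns (pcFinish (t.foldl bStep ([], line, 1))) := by
        have : bStep ([], "", 0) line = ([], line, 1) := by simp [bStep]
        simp [process_chunk_alt, pcRuns, List.foldl_cons, this]
      rw [hA, hB, pc_loop t [] line 1 (by omega)]
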